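-- pv_equiv track=rewrite | github.com/DanBukin/Prometey | Prometey2.0/prometey_functions.py | filtred_array
-- ===== SOURCE A (Python) =====
-- def filtred_array(arr,arr_2):
--     """
--         Фильтрует массив arr, удаляя подряд идущие одинаковые элементы.
--         Одновременно удаляются соответствующие элементы из arr_2.
--
--         Args:
--             arr (list): Список значений, в котором нужно удалить подряд дублирующиеся элементы.
--             arr_2 (list): Сопутствующий список значений, синхронный с arr.
--
--         Returns:
--             tuple: (filtered_arr, filtered_arr_2) — списки без повторов по arr.
--     """
--     result = []
--     result_2 = []
--     for i in range(len(arr)):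
--         if i == 0 or arr[i] != arr[i - 1]:
--             result.append(arr[i])
--             result_2.append(arr_2[i])
--     return result, result_2
-- ===== SOURCE B (Python) =====
-- def filtred_array(arr, arr_2):
--     result = []
--     result_2 = []
--     i = 0
--     n = len(arr)
--     while i < n:
--         result.append(arr[i])
--         result_2.append(arr_2[i])
--         j = i + 1
--         while j < n and arr[j] == arr[i]:
--             j += 1
--         i = j
--     return result, result_2
-- ===== Notes on version B (the rewrite author's own statement) =====
-- stated objective: alternative
-- what changed: B iterates run-by-run: an outer loop appends the first element of each maximal run and an inner scan skips the rest of the run, instead of A's single per-index loop comparing arr[i] to arr[i-1].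
import Mathlib
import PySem

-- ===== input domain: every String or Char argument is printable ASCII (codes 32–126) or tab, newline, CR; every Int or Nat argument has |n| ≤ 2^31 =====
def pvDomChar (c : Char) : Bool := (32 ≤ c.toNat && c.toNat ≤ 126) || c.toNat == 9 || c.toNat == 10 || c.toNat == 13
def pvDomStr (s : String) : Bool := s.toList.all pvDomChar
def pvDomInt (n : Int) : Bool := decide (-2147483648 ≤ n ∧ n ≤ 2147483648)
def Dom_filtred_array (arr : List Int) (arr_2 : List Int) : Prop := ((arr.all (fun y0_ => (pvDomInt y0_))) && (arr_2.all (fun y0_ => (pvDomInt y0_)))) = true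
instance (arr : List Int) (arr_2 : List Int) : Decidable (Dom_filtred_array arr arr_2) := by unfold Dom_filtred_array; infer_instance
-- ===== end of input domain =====

-- B replaces A's per-index comparison with an outer run-by-run loop whose inner scan skips each
-- maximal run of equal elements (objective: alternative decomposition, same asymptotic cost).

-- ===== PORT A =====
-- Literal port of A: for i in range(len(arr)): if i == 0 or arr[i] != arr[i-1]: append arr[i], arr_2[i].
-- arr[i] and arr[i-1] are always in range; arr_2[i] is ported as getD with default 0, exact under
-- Pre_filtred_array (which excludes exactly the inputs where Python A raises IndexError).
def filtred_array (arr : List Int) (arr_2 : List Int) : List Int × List Int :=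
  (List.range arr.length).foldl
    (fun (st : List Int × List Int) i =>
      if i = 0 ∨ arr.getD i 0 ≠ arr.getD (i - 1) 0 then
        (st.1 ++ [arr.getD i 0], st.2 ++ [arr_2.getD i 0])
      else st)
    ([], [])

-- ===== PORT B =====
-- inner while loop of Source B: advance j past the maximal run of elements equal to x
def pvSkip (arr : List Int) (n : Nat) (x : Int) (j : Nat) : Nat :=
  if h : j < n ∧ arr.getD j 0 = x then pvSkip arr n x (j + 1) else j
termination_by n - j
decreasing_by omega

-- termination fact for the outer loop: the inner scan never moves backwards
theorem pvSkip_le (arr : List Int) (n : Nat) (x : Int) (j : Nat) : j ≤ pvSkip arr n x j := by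
  unfold pvSkip
  split
  · have := pvSkip_le arr n x (j + 1)
    omega
  · exact Nat.le_refl j
termination_by n - j
decreasing_by omega

-- outer while loop of Source B: at index i append arr[i], arr_2[i], then jump to the end of the run.
-- arr_2[i] ported as getD with default 0, exact under Pre_filtred_array (B raises exactly where A does).
def pvRuns (arr : List Int) (arr_2 : List Int) (n : Nat) (i : Nat) : List Int × List Int :=
  if h : i < n then
    let p := pvRuns arr arr_2 n (pvSkip arr n (arr.getD i 0) (i + 1))
    (arr.getD i 0 :: p.1, arr_2.getD i 0 :: p.2)
  else ([], [])
termination_by n - i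
decreasing_by
  have : i + 1 ≤ pvSkip arr n (arr.getD i 0) (i + 1) := pvSkip_le arr n (arr.getD i 0) (i + 1)
  omega

def filtred_array_alt (arr : List Int) (arr_2 : List Int) : List Int × List Int :=
  pvRuns arr arr_2 arr.length 0

-- ===== PRECONDITION & SPEC =====
-- Pre_ excludes exactly the inputs on which Python A raises IndexError (a kept index i reaches
-- beyond arr_2); Python B raises IndexError on exactly the same inputs.
def Pre_filtred_array (arr : List Int) (arr_2 : List Int) : Prop :=
  ∀ i, i < arr.length → (i = 0 ∨ arr.getD i 0 ≠ arr.getD (i - 1) 0) → i < arr_2.length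

instance (arr : List Int) (arr_2 : List Int) : Decidable (Pre_filtred_array arr arr_2) := by
  unfold Pre_filtred_array; infer_instance

def pvWitness_filtred_array : List Int × List Int := ([1, 1, 2], [5, 6, 7])

def Spec_filtred_array (arr : List Int) (arr_2 : List Int) (out : List Int × List Int) : Prop := out = filtred_array_alt arr arr_2
instance (arr : List Int) (arr_2 : List Int) (out : List Int × List Int) : Decidable (Spec_filtred_array arr arr_2 out) := by unfold Spec_filtred_array; infer_instance

-- ===== CLAIM (what is proved, stated in full; the proofs are below) =====
def Claim_equal_filtred_array : Prop := ∀ (arr : List Int) (arr_2 : List Int), Dom_filtred_array arr arr_2 → Pre_filtred_array arr arr_2 → Spec_filtred_array arr arr_2 (filtred_array arr arr_2)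

-- ===== LEMMAS AND PROOFS =====

-- the "kept index" predicate common to both characterizations
def keptP (arr : List Int) (i : Nat) : Bool := decide (i = 0 ∨ arr.getD i 0 ≠ arr.getD (i - 1) 0)

-- A's fold over range m builds the maps of the kept indices below m
theorem foldA_eq (arr arr_2 : List Int) (m : Nat) :
    (List.range m).foldl
      (fun (st : List Int × List Int) i =>
        if i = 0 ∨ arr.getD i 0 ≠ arr.getD (i - 1) 0 then
          (st.1 ++ [arr.getD i 0], st.2 ++ [arr_2.getD i 0])
        else st)
      ([], []) =
    (((List.range m).filter (keptP arr)).map (fun t => arr.getD t 0),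
     ((List.range m).filter (keptP arr)).map (fun t => arr_2.getD t 0)) := by
  induction m with
  | zero => simp
  | succ m ih =>
    rw [List.range_succ, List.foldl_append, ih, List.filter_append]
    by_cases h : m = 0 ∨ arr.getD m 0 ≠ arr.getD (m - 1) 0
    · have hkm : keptP arr m = true := by
        simp only [keptP, decide_eq_true_eq]; exact h
      simp only [List.foldl_cons, List.foldl_nil]
      rw [if_pos h]; simp [hkm]
    · have hkm : keptP arr m = false := by
        simp only [keptP, decide_eq_false_iff_not]; exact h
      simp only [List.foldl_cons, List.foldl_nil]
      rw [if_neg h]; simp [hkm]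

-- every index scanned over by the inner while loop carries the run's value
theorem pvSkip_run (arr : List Int) (n : Nat) (x : Int) (j : Nat) :
    ∀ t, j ≤ t → t < pvSkip arr n x j → arr.getD t 0 = x := by
  intro t h1 h2
  rw [pvSkip] at h2
  split at h2
  · rename_i h
    rcases Nat.eq_or_lt_of_le h1 with rfl | h1'
    · exact h.2
    · exact pvSkip_run arr n x (j + 1) t h1' h2
  · omega
termination_by n - j
decreasing_by omega

-- where the inner while loop stops
theorem pvSkip_stop (arr : List Int) (n : Nat) (x : Int) (j : Nat) :
    pvSkip arr n x j ≤ max j n ∧ (pvSkip arr n x j < n → arr.getD (pvSkip arr n x j) 0 ≠ x) := by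
  rw [pvSkip]
  split
  · rename_i h
    have := pvSkip_stop arr n x (j + 1)
    constructor
    · omega
    · exact this.2
  · rename_i h
    constructor
    · omega
    · intro hn heq
      exact h ⟨hn, heq⟩
termination_by n - j
decreasing_by omega

-- B's outer loop from a kept index i builds the maps of the kept indices in [i, n)
theorem pvRuns_eq (arr arr_2 : List Int) (n : Nat) (i : Nat)
    (hk : i < n → keptP arr i = true) :
    pvRuns arr arr_2 n i =
    (((List.range' i (n - i)).filter (keptP arr)).map (fun t => arr.getD t 0),
     ((List.range' i (n - i)).filter (keptP arr)).map (fun t => arr_2.getD t 0)) := by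
  by_cases h : i < n
  · set x := arr.getD i 0 with hx
    set j := pvSkip arr n x (i + 1) with hj
    have hle : i + 1 ≤ j := pvSkip_le arr n x (i + 1)
    have hstop := pvSkip_stop arr n x (i + 1)
    have hjn : j ≤ n := by omega
    have hrun : ∀ t, i + 1 ≤ t → t < j → arr.getD t 0 = x := pvSkip_run arr n x (i + 1)
    -- the run value extends one step left: arr[i] = x
    have hrun' : ∀ t, i ≤ t → t < j → arr.getD t 0 = x := by
      intro t ht1 ht2
      rcases Nat.eq_or_lt_of_le ht1 with rfl | ht1'
      · rfl
      · exact hrun t ht1' ht2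
    -- j is itself a kept index (or = n)
    have hkj : j < n → keptP arr j = true := by
      intro hjn'
      have hne : arr.getD j 0 ≠ x := hstop.2 hjn'
      have hprev : arr.getD (j - 1) 0 = x := hrun' (j - 1) (by omega) (by omega)
      simp only [keptP, decide_eq_true_eq]
      right
      rw [hprev]
      exact hne
    have ih := pvRuns_eq arr arr_2 n j hkj
    -- decompose the index range [i, n) as i :: [i+1, j) ++ [j, n)
    have hsplit : List.range' i (n - i) =
        i :: (List.range' (i + 1) (j - (i + 1)) ++ List.range' j (n - j)) := by
      have h1 : n - i = (n - i - 1) + 1 := by omega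
      rw [h1, List.range'_succ]
      congr 1
      have h2 : List.range' (i + 1) (j - (i + 1)) ++ List.range' ((i + 1) + (j - (i + 1))) (n - j)
          = List.range' (i + 1) ((j - (i + 1)) + (n - j)) := List.range'_append_1
      have h3 : (i + 1) + (j - (i + 1)) = j := by omega
      have h4 : (j - (i + 1)) + (n - j) = n - i - 1 := by omega
      rw [h3, h4] at h2
      exact h2.symm
    -- no index strictly inside the run is kept
    have hmid : (List.range' (i + 1) (j - (i + 1))).filter (keptP arr) = [] := by
      apply List.filter_eq_nil_iff.mpr
      intro t ht
      have hb := List.mem_range'_1.mp ht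
      simp only [keptP, decide_eq_true_eq, not_or, not_not]
      constructor
      · omega
      · rw [hrun' t (by omega) (by omega), hrun' (t - 1) (by omega) (by omega)]
    rw [pvRuns]
    simp only [h, dif_pos]
    rw [← hx, ← hj, ih, hsplit]
    simp [List.filter_append, hmid, hk h]
    exact hx
  · rw [pvRuns]
    have : n - i = 0 := by omega
    simp [h, this]
termination_by n - i
decreasing_by
  have : i + 1 ≤ pvSkip arr n (arr.getD i 0) (i + 1) := pvSkip_le arr n (arr.getD i 0) (i + 1)
  omega

-- ===== VERDICT (by name: the statement is the Claim_ definition above) =====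
theorem filtred_array_spec : Claim_equal_filtred_array := by
  intro arr arr_2 _ _
  unfold Spec_filtred_array filtred_array filtred_array_alt
  rw [foldA_eq, pvRuns_eq arr arr_2 arr.length 0 (by intro _; simp [keptP]),
    ← List.range_eq_range']
  simp
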